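-- pv_equiv track=rewrite | github.com/mmichalak-swe/Algo_Expert_Python | Min_Passes_Of_Matrix/attempt_1.py | checkPositives
-- ===== SOURCE A (Python) =====
-- def checkPositives(matrix):
--     for row in matrix:
--         for num in row:
--             if num >= 0:
--                 continue
--             else:
--                 return False
--     return True
-- ===== SOURCE B (Python) =====
-- def checkPositives(matrix):
--     return min((num for row in matrix for num in row), default=0) >= 0
-- ===== Notes on version B (the rewrite author's own statement) =====
-- stated objective: simpler
-- what changed: Replaces the nested early-return loops with a single guarded reduction: take the minimum of all elements (default 0 for an empty iteration) and compare it once against 0.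
import Mathlib
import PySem

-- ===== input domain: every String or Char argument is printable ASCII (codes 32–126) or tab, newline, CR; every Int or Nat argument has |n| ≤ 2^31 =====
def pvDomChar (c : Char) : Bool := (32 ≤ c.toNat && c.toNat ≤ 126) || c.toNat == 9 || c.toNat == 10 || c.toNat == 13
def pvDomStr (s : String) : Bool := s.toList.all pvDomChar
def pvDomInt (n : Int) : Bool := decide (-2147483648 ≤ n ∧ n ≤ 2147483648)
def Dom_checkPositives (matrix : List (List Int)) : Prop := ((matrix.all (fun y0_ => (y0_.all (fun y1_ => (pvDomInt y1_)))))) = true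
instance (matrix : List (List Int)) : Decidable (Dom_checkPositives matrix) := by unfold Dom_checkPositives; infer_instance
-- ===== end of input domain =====

-- B replaces A's nested early-return loops by one guarded reduction (minimum with default 0) and a single comparison; objective: simpler.

-- ===== PORT A =====
-- inner loop: for num in row: continue if num >= 0 else return False
def checkPositivesRow (row : List Int) : Bool :=
  match row with
  | [] => true
  | num :: rest => if num ≥ 0 then checkPositivesRow rest else false

def checkPositives (matrix : List (List Int)) : Bool :=
  match matrix with
  | [] => true
  | row :: rest => if checkPositivesRow row then checkPositives rest else false

-- ===== PORT B =====
-- min((num for row in matrix for num in row), default=0) >= 0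
def checkPositives_alt (matrix : List (List Int)) : Bool :=
  let nums := matrix.flatMap (fun row => row)
  let m : Int := match nums with
    | [] => 0
    | x :: rest => rest.foldl min x
  decide (m ≥ 0)

-- ===== PRECONDITION & SPEC =====
def Spec_checkPositives (matrix : List (List Int)) (out : Bool) : Prop := out = checkPositives_alt matrix
instance (matrix : List (List Int)) (out : Bool) : Decidable (Spec_checkPositives matrix out) := by unfold Spec_checkPositives; infer_instance

-- ===== CLAIM (what is proved, stated in full; the proofs are below) =====
def Claim_equal_checkPositives : Prop := ∀ (matrix : List (List Int)), Dom_checkPositives matrix → Spec_checkPositives matrix (checkPositives matrix)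

-- ===== LEMMAS AND PROOFS =====
theorem checkPositivesRow_eq (row : List Int) :
    checkPositivesRow row = decide (∀ x ∈ row, 0 ≤ x) := by
  induction row with
  | nil => simp [checkPositivesRow]
  | cons n t ih =>
    simp only [checkPositivesRow, ih]
    by_cases h : (0 : Int) ≤ n <;> simp [h]

theorem checkPositives_eq (matrix : List (List Int)) :
    checkPositives matrix = decide (∀ r ∈ matrix, ∀ x ∈ r, 0 ≤ x) := by
  induction matrix with
  | nil => simp [checkPositives]
  | cons r t ih =>
    simp only [checkPositives, checkPositivesRow_eq, ih]
    by_cases h : (∀ x ∈ r, (0:Int) ≤ x) <;> simp [h]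

theorem foldl_min_nonneg (x : Int) (t : List Int) :
    (0 ≤ t.foldl min x) ↔ (0 ≤ x ∧ ∀ y ∈ t, 0 ≤ y) := by
  induction t generalizing x with
  | nil => simp
  | cons y s ih =>
    simp only [List.foldl_cons, ih, le_min_iff, List.mem_cons]
    constructor
    · rintro ⟨⟨hx, hy⟩, hs⟩
      exact ⟨hx, fun z hz => hz.elim (fun h => h ▸ hy) (hs z)⟩
    · rintro ⟨hx, h⟩
      exact ⟨⟨hx, h y (Or.inl rfl)⟩, fun z hz => h z (Or.inr hz)⟩

theorem checkPositives_alt_eq (matrix : List (List Int)) :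
    checkPositives_alt matrix = decide (∀ r ∈ matrix, ∀ x ∈ r, 0 ≤ x) := by
  unfold checkPositives_alt
  have hmem : ∀ z : Int, z ∈ matrix.flatMap (fun row => row) ↔ ∃ r ∈ matrix, z ∈ r := by
    intro z; simp
  have key : (∀ z ∈ matrix.flatMap (fun row => row), (0:Int) ≤ z) ↔
      (∀ r ∈ matrix, ∀ x ∈ r, (0:Int) ≤ x) := by
    constructor
    · intro hall r hr x hx; exact hall x ((hmem x).mpr ⟨r, hr, hx⟩)
    · intro hall z hz; rcases (hmem z).mp hz with ⟨r, hr, hz'⟩; exact hall r hr z hz'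
  cases h : matrix.flatMap (fun row => row) with
  | nil =>
    have : ∀ r ∈ matrix, ∀ x ∈ r, (0:Int) ≤ x := key.mp (by simp [h])
    simp only [ge_iff_le]
    simp
    exact this
  | cons x rest =>
    have : (0 ≤ rest.foldl min x) ↔ (∀ r ∈ matrix, ∀ x ∈ r, (0:Int) ≤ x) := by
      rw [foldl_min_nonneg, ← key, h]
      simp
    by_cases hall : (∀ r ∈ matrix, ∀ x ∈ r, (0:Int) ≤ x) <;> simp [hall, this]

-- ===== VERDICT (by name: the statement is the Claim_ definition above) =====
theorem checkPositives_spec : Claim_equal_checkPositives := by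
  intro matrix _
  unfold Spec_checkPositives
  rw [checkPositives_eq, checkPositives_alt_eq]
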